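-- pv_equiv track=rewrite | github.com/justinbois/bebi103 | bebi103/stan.py | _get_var_name
-- ===== SOURCE A (Python) =====
-- def _get_var_name(parameter):
--     """Convert a parameter name to a var_name. Example: 'alpha[0,1]'
--     returns 'alpha'."""
--     if parameter[-1] != "]":
--         return parameter
--
--     ind = parameter.rfind("[")
--     if ind == 0 or ind == len(parameter) - 1:
--         return parameter
--
--     substr = parameter[ind + 1 : -1]
--     if len(substr) == 0:
--         return parameter
--
--     if not substr[0].isdigit():
--         return parameter
--
--     if not substr[-1].isdigit():
--         return parameter
--
--     for char in substr:
--         if not (char.isdigit() or char == ","):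
--             return parameter
--
--     if ",," in substr:
--         return parameter
--
--     return parameter[:ind]
-- ===== SOURCE B (Python) =====
-- def _get_var_name(parameter):
--     """Strip a trailing integer-index suffix like '[0,1]' from a parameter
--     name; return the name unchanged when no such suffix is present."""
--     if not parameter.endswith("]"):
--         return parameter
--     ind = parameter.rfind("[")
--     if ind <= 0:
--         return parameter
--     if all(p.isdigit() for p in parameter[ind + 1 : -1].split(",")):
--         return parameter[:ind]
--     return parameter
-- ===== Notes on version B (the rewrite author's own statement) =====
-- stated objective: simpler
-- what changed: The four separate validation passes over the inner substring (first char, last char, char-by-char scan, ',,' search) are replaced by one split(',') with all parts required to be digit strings, and the two index guards collapse to 'ind <= 0'.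
-- intended difference: On strings that end with ']', contain no '[', and whose body before the ']' is a nonempty comma-separated list of digit runs (e.g. '12]'), A's rfind returns -1 which slips past its guards and A returns parameter[:-1] ('12'), silently stripping a bracket that never opened; B returns the parameter unchanged, the intended value since there is no index suffix to strip. — e.g. on _get_var_name("1]"): A returns "1", B returns "1]"
import Mathlib
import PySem

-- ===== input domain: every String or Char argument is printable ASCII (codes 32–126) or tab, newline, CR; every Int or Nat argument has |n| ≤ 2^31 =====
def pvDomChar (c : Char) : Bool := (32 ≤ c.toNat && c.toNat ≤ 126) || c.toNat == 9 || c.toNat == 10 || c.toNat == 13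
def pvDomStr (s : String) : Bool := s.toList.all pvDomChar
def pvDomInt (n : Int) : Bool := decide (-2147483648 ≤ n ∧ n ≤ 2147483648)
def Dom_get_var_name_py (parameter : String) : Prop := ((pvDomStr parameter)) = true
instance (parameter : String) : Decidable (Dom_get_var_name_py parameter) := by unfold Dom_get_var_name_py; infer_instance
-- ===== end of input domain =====

-- B replaces A's four validation passes over the inner substring by a single split(',') whose parts must all be digit runs (objective: simpler).

-- ===== PORT A =====
def get_var_name_py (parameter : String) : String :=
  match PySem.Str.pyGet? parameter (-1) with
  | none => parameter          -- Python raises IndexError on "" here; excluded by Pre_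
  | some c =>
    if c ≠ ']' then parameter
    else
      let ind : Int := PySem.Str.rfind parameter "["
      if ind = 0 ∨ ind = PySem.Str.len parameter - 1 then parameter
      else
        let substr := PySem.Str.slice parameter (some (ind + 1)) (some (-1))
        if PySem.Str.len substr = 0 then parameter
        else
          match PySem.Str.pyGet? substr 0 with
          | none => parameter  -- unreachable: substr is nonempty
          | some c0 =>
            if ¬ PySem.Chars.isdigit c0 then parameter
            else
              match PySem.Str.pyGet? substr (-1) with
              | none => parameter  -- unreachable: substr is nonempty
              | some cl =>
                if ¬ PySem.Chars.isdigit cl then parameter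
                else if ¬ substr.toList.all (fun ch => PySem.Chars.isdigit ch || ch == ',') then parameter
                else if PySem.Str.isIn ",," substr then parameter
                else PySem.Str.slice parameter none (some ind)

-- ===== PORT B =====
def get_var_name_py_alt (parameter : String) : String :=
  if ¬ PySem.Str.endswith parameter "]" then parameter
  else
    let ind : Int := PySem.Str.rfind parameter "["
    if ind ≤ 0 then parameter
    else if (PySem.Chars.splitOn (PySem.Str.slice parameter (some (ind + 1)) (some (-1))).toList [',']).all PySem.Chars.strIsdigit
      then PySem.Str.slice parameter none (some ind)
      else parameter

-- ===== PRECONDITION & SPEC =====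
-- Pre_ excludes only the empty string, on which Python's A raises IndexError at parameter[-1].
def Pre_get_var_name_py (parameter : String) : Prop := parameter ≠ ""
instance (parameter : String) : Decidable (Pre_get_var_name_py parameter) := by unfold Pre_get_var_name_py; infer_instance
def pvWitness_get_var_name_py : String := "alpha[0,1]"

-- grammar recogniser used by D_: a nonempty comma-separated list of digit runs, digits(,digits)*
mutual
def pvDigits : List Char → Bool
  | [] => false
  | c :: t => PySem.Chars.isdigit c && pvDigitsCont t
def pvDigitsCont : List Char → Bool
  | [] => true
  | c :: t => if c = ',' then pvDigits t else (PySem.Chars.isdigit c && pvDigitsCont t)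
end

-- On strings that end with ']', contain no '[', and whose body before the ']' is a nonempty
-- comma-separated list of digit runs (e.g. '12]'), A returns parameter[:-1] (rfind's -1 slips
-- past its guards and strips a bracket that never opened); B returns the parameter unchanged,
-- the intended value since there is no index suffix to strip.
def D_get_var_name_py (parameter : String) : Prop :=
  PySem.Chars.endswith parameter.toList [']'] = true ∧ '[' ∉ parameter.toList ∧
    pvDigits parameter.toList.dropLast = true
instance (parameter : String) : Decidable (D_get_var_name_py parameter) := by unfold D_get_var_name_py; infer_instance

def Spec_get_var_name_py (parameter : String) (out : String) : Prop :=
  ¬ D_get_var_name_py parameter → out = get_var_name_py_alt parameter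
instance (parameter : String) (out : String) : Decidable (Spec_get_var_name_py parameter out) := by unfold Spec_get_var_name_py; infer_instance

def pvDiffWitness_get_var_name_py : String := "1]"
def pvDiffWitnessOut_get_var_name_py : String × String := ("1", "1]")

-- ===== CLAIM (what is proved, stated in full; the proofs are below) =====
def Claim_unchanged_get_var_name_py : Prop := ∀ (parameter : String), Dom_get_var_name_py parameter → Pre_get_var_name_py parameter → Spec_get_var_name_py parameter (get_var_name_py parameter)
def Claim_changed_get_var_name_py : Prop := Dom_get_var_name_py (pvDiffWitness_get_var_name_py) ∧ Pre_get_var_name_py (pvDiffWitness_get_var_name_py) ∧ D_get_var_name_py (pvDiffWitness_get_var_name_py) ∧ get_var_name_py (pvDiffWitness_get_var_name_py) = pvDiffWitnessOut_get_var_name_py.1 ∧ get_var_name_py_alt (pvDiffWitness_get_var_name_py) = pvDiffWitnessOut_get_var_name_py.2 ∧ pvDiffWitnessOut_get_var_name_py.1 ≠ pvDiffWitnessOut_get_var_name_py.2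
def Claim_exact_get_var_name_py : Prop := ∀ (parameter : String), Dom_get_var_name_py parameter → Pre_get_var_name_py parameter → D_get_var_name_py parameter → get_var_name_py parameter ≠ get_var_name_py_alt parameter

-- ===== LEMMAS AND PROOFS =====

-- my recursive rendering of Python's split(',') on a list of chars
def pvConsHead (pre : List Char) : List (List Char) → List (List Char)
  | [] => [pre]
  | p :: ps => (pre ++ p) :: ps
def pvSplit : List Char → List (List Char)
  | [] => [[]]
  | c :: t => if c = ',' then [] :: pvSplit t else pvConsHead [c] (pvSplit t)

theorem pvSplit_ne_nil (l : List Char) : pvSplit l ≠ [] := by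
  cases l with
  | nil => simp [pvSplit]
  | cons c t =>
    by_cases hc : c = ','
    · simp [pvSplit, hc]
    · simp only [pvSplit, if_neg hc]
      cases h : pvSplit t <;> simp [pvConsHead]

theorem pvConsHead_nil (ps : List (List Char)) (h : ps ≠ []) : pvConsHead [] ps = ps := by
  cases ps with
  | nil => exact absurd rfl h
  | cons p ps => simp [pvConsHead]

theorem pvConsHead_append (x : List Char) (c : Char) (ps : List (List Char)) :
    pvConsHead (x ++ [c]) ps = pvConsHead x (pvConsHead [c] ps) := by
  cases ps <;> simp [pvConsHead]

theorem pvSplit_go : ∀ (l : List Char) (fuel : Nat) (cur : List Char) (acc : List (List Char)),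
    l.length ≤ fuel →
    PySem.Chars.splitOn.go [','] fuel l cur acc = acc.reverse ++ pvConsHead cur.reverse (pvSplit l) := by
  intro l
  induction l with
  | nil =>
    intro fuel cur acc _
    cases fuel <;> simp [PySem.Chars.splitOn.go, pvSplit, pvConsHead]
  | cons c t ih =>
    intro fuel cur acc h
    cases fuel with
    | zero => simp at h
    | succ f =>
      obtain ⟨p, ps, hpt⟩ : ∃ p ps, pvSplit t = p :: ps := by
        cases hh : pvSplit t with
        | nil => exact absurd hh (pvSplit_ne_nil t)
        | cons a b => exact ⟨a, b, rfl⟩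
      by_cases hc : c = ','
      · subst hc
        have hp : [','].isPrefixOf (',' :: t) = true := by simp [List.isPrefixOf]
        rw [PySem.Chars.splitOn.go, hp]
        simp only [if_true, List.length_cons, List.length_nil, List.drop_succ_cons, List.drop_zero]
        rw [ih f [] (cur.reverse :: acc) (by simp at h; omega)]
        simp [pvSplit, pvConsHead, hpt]
      · have hp : [','].isPrefixOf (c :: t) = false := by
          simp [List.isPrefixOf]
          exact fun h' => hc h'.symm
        rw [PySem.Chars.splitOn.go, hp]
        simp only [Bool.false_eq_true, if_false]
        rw [ih f (c :: cur) acc (by simp at h; omega)]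
        simp [pvSplit, if_neg hc, pvConsHead_append, List.reverse_cons]

theorem pvSplitOn_eq (l : List Char) : PySem.Chars.splitOn l [','] = pvSplit l := by
  have h := pvSplit_go l (l.length + 1) [] [] (by omega)
  simpa [PySem.Chars.splitOn, pvConsHead_nil _ (pvSplit_ne_nil l)] using h

theorem pvPQ : ∀ (n : Nat) (l : List Char), l.length ≤ n →
    ((pvSplit l).all PySem.Chars.strIsdigit = pvDigits l) ∧
    (((pvSplit l).headI.all PySem.Chars.isdigit && ((pvSplit l).tail).all PySem.Chars.strIsdigit) = pvDigitsCont l) := by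
  intro n
  induction n with
  | zero =>
    intro l h
    have hl : l = [] := by cases l <;> simp_all
    subst hl
    constructor <;> simp [pvSplit, pvDigits, pvDigitsCont, PySem.Chars.strIsdigit]
  | succ n ih =>
    intro l h
    cases l with
    | nil => constructor <;> simp [pvSplit, pvDigits, pvDigitsCont, PySem.Chars.strIsdigit]
    | cons c t =>
      obtain ⟨ihP, ihQ⟩ := ih t (by simp at h; omega)
      obtain ⟨p, ps, hpt⟩ : ∃ p ps, pvSplit t = p :: ps := by
        cases hh : pvSplit t with
        | nil => exact absurd hh (pvSplit_ne_nil t)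
        | cons a b => exact ⟨a, b, rfl⟩
      have ihQ' : (p.all PySem.Chars.isdigit && ps.all PySem.Chars.strIsdigit) = pvDigitsCont t := by
        rw [hpt] at ihQ; simpa using ihQ
      by_cases hc : c = ','
      · subst hc
        constructor
        · rw [show pvSplit (',' :: t) = [] :: pvSplit t from by simp [pvSplit],
            show pvDigits (',' :: t) = (PySem.Chars.isdigit ',' && pvDigitsCont t) from by simp [pvDigits]]
          simp [PySem.Chars.strIsdigit, show PySem.Chars.isdigit ',' = false from by decide]
        · rw [show pvSplit (',' :: t) = [] :: pvSplit t from by simp [pvSplit],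
            show pvDigitsCont (',' :: t) = pvDigits t from by simp [pvDigitsCont]]
          simpa using ihP
      · have hsp : pvSplit (c :: t) = (c :: p) :: ps := by
          simp [pvSplit, if_neg hc, hpt, pvConsHead]
        constructor
        · rw [hsp, show pvDigits (c :: t) = (PySem.Chars.isdigit c && pvDigitsCont t) from by
            simp [pvDigits], ← ihQ']
          simp [PySem.Chars.strIsdigit, Bool.and_assoc]
        · rw [hsp, show pvDigitsCont (c :: t) = (PySem.Chars.isdigit c && pvDigitsCont t) from by
            simp [pvDigitsCont, if_neg hc], ← ihQ']
          simp [Bool.and_assoc]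

theorem pvValB (l : List Char) :
    (PySem.Chars.splitOn l [',']).all PySem.Chars.strIsdigit = pvDigits l := by
  rw [pvSplitOn_eq]; exact (pvPQ l.length l le_rfl).1

theorem pvPrefix2 (l : List Char) :
    ([',', ','] <+: l) ↔ (l.head? = some ',' ∧ l.tail.head? = some ',') := by
  match l with
  | [] => simp
  | [a] => simp [List.cons_prefix_cons, eq_comm]
  | a :: b :: r => simp [List.cons_prefix_cons, eq_comm]

theorem pvInfix2_cons (c : Char) (t : List Char) :
    ([',', ','] <:+: (c :: t)) ↔ ((c = ',' ∧ t.head? = some ',') ∨ [',', ','] <:+: t) := by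
  rw [List.infix_cons_iff]
  constructor
  · rintro (hpre | h)
    · left
      have h2 := (pvPrefix2 _).mp hpre
      simp only [List.head?_cons, Option.some.injEq, List.tail_cons] at h2
      exact ⟨h2.1, h2.2⟩
    · right; exact h
  · rintro (⟨h1, h2⟩ | h)
    · subst h1
      left
      exact (pvPrefix2 _).mpr (by simpa using h2)
    · right; exact h

theorem pvAuxChar : ∀ (t : List Char),
    pvDigitsCont t = true ↔
      ((∀ c ∈ t, (PySem.Chars.isdigit c || c == ',') = true) ∧ ¬ ([',', ','] <:+: t) ∧
        (∀ x, t.getLast? = some x → PySem.Chars.isdigit x = true)) := by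
  intro t
  induction t with
  | nil => simp [pvDigitsCont]
  | cons c t ih =>
    rw [pvInfix2_cons]
    by_cases hdc : PySem.Chars.isdigit c = true
    · have hcne : c ≠ ',' := fun h => by subst h; exact absurd hdc (by decide)
      rw [show pvDigitsCont (c :: t) = (PySem.Chars.isdigit c && pvDigitsCont t) from by
        simp [pvDigitsCont, if_neg hcne], hdc, Bool.true_and, ih]
      cases t with
      | nil => simp [hdc, hcne]
      | cons d t' =>
        constructor
        · rintro ⟨hmem, hinf, hlast⟩
          refine ⟨?_, ?_, ?_⟩
          · intro x hx
            rcases List.mem_cons.mp hx with rfl | hx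
            · simp [hdc]
            · exact hmem x hx
          · rintro (⟨hc1, _⟩ | h2)
            · exact hcne hc1
            · exact hinf h2
          · intro x hx
            rw [List.getLast?_cons_cons] at hx
            exact hlast x hx
        · rintro ⟨hmem, hinf, hlast⟩
          refine ⟨?_, ?_, ?_⟩
          · intro x hx; exact hmem x (List.mem_cons_of_mem _ hx)
          · intro h2; exact hinf (Or.inr h2)
          · intro x hx
            exact hlast x (by rw [List.getLast?_cons_cons]; exact hx)
    · by_cases hcc : c = ','
      · subst hcc
        rw [show pvDigitsCont (',' :: t) = pvDigits t from by simp [pvDigitsCont]]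
        cases t with
        | nil =>
          rw [show pvDigits ([] : List Char) = false from by simp [pvDigits]]
          simp only [Bool.false_eq_true, false_iff]
          rintro ⟨_, _, hlast⟩
          exact absurd (hlast ',' (by simp)) (by decide)
        | cons d t' =>
          by_cases hd : PySem.Chars.isdigit d = true
          · have hdne : d ≠ ',' := fun h => by subst h; exact absurd hd (by decide)
            rw [show pvDigits (d :: t') = pvDigitsCont (d :: t') from by
              simp [pvDigits, pvDigitsCont, if_neg hdne, hd], ih]
            constructor
            · rintro ⟨hmem, hinf, hlast⟩
              refine ⟨?_, ?_, ?_⟩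
              · intro x hx
                rcases List.mem_cons.mp hx with rfl | hx
                · simp
                · exact hmem x hx
              · rintro (⟨_, hh⟩ | h2)
                · simp only [List.head?_cons, Option.some.injEq] at hh
                  exact hdne hh
                · exact hinf h2
              · intro x hx
                rw [List.getLast?_cons_cons] at hx
                exact hlast x hx
            · rintro ⟨hmem, hinf, hlast⟩
              exact ⟨fun x hx => hmem x (List.mem_cons_of_mem _ hx), fun h2 => hinf (Or.inr h2),
                fun x hx => hlast x (by rw [List.getLast?_cons_cons]; exact hx)⟩
          · have hd' : PySem.Chars.isdigit d = false := by simpa using hd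
            rw [show pvDigits (d :: t') = (PySem.Chars.isdigit d && pvDigitsCont t') from by
              simp [pvDigits], hd', Bool.false_and]
            simp only [Bool.false_eq_true, false_iff]
            by_cases hdc2 : d = ','
            · subst hdc2
              rintro ⟨_, hinf, _⟩
              exact hinf (Or.inl (by simp))
            · rintro ⟨hmem, _, _⟩
              have h := hmem d (by simp)
              simp [hd', hdc2] at h
      · have hdc' : PySem.Chars.isdigit c = false := by simpa using hdc
        rw [show pvDigitsCont (c :: t) = (PySem.Chars.isdigit c && pvDigitsCont t) from by
          simp [pvDigitsCont, if_neg hcc], hdc', Bool.false_and]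
        simp only [Bool.false_eq_true, false_iff]
        rintro ⟨hmem, _, _⟩
        have h := hmem c (by simp)
        simp [hdc', hcc] at h

theorem pvValA (l : List Char) :
    pvDigits l = true ↔
      (l ≠ [] ∧ (∀ x, l[0]? = some x → PySem.Chars.isdigit x = true) ∧
        (∀ x, l.getLast? = some x → PySem.Chars.isdigit x = true) ∧
        (∀ c ∈ l, (PySem.Chars.isdigit c || c == ',') = true) ∧ ¬ ([',', ','] <:+: l)) := by
  cases l with
  | nil => simp [pvDigits]
  | cons c t =>
    rw [show pvDigits (c :: t) = (PySem.Chars.isdigit c && pvDigitsCont t) from by simp [pvDigits]]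
    by_cases hc : PySem.Chars.isdigit c = true
    · have hcne : c ≠ ',' := fun h => by subst h; exact absurd hc (by decide)
      rw [hc, Bool.true_and, pvAuxChar, pvInfix2_cons]
      constructor
      · rintro ⟨hmem, hinf, hlast⟩
        refine ⟨List.cons_ne_nil c t, ?_, ?_, ?_, ?_⟩
        · intro x hx; simp only [List.getElem?_cons_zero, Option.some.injEq] at hx
          subst hx; exact hc
        · intro x hx
          cases t with
          | nil =>
            simp only [List.getLast?_singleton, Option.some.injEq] at hx
            subst hx; exact hc
          | cons d t' =>
            rw [List.getLast?_cons_cons] at hx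
            exact hlast x hx
        · intro x hx
          rcases List.mem_cons.mp hx with rfl | hx
          · simp [hc]
          · exact hmem x hx
        · rintro (⟨h1, _⟩ | h2)
          · exact hcne h1
          · exact hinf h2
      · rintro ⟨_, _, hlast, hmem, hinf⟩
        refine ⟨fun x hx => hmem x (List.mem_cons_of_mem _ hx), ?_, ?_⟩
        · intro h2; exact hinf (Or.inr h2)
        · intro x hx
          cases t with
          | nil => simp at hx
          | cons d t' =>
            exact hlast x (by rw [List.getLast?_cons_cons]; exact hx)
    · have hc' : PySem.Chars.isdigit c = false := by simpa using hc
      rw [hc', Bool.false_and]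
      simp only [Bool.false_eq_true, false_iff]
      rintro ⟨_, hhead, _, _, _⟩
      exact absurd (hhead c (by simp)) hc

-- rfind of a single character
theorem pvPrefC (c : Char) (l : List Char) : [c].isPrefixOf l = true ↔ l.head? = some c := by
  cases l with
  | nil => simp [List.isPrefixOf]
  | cons b bs =>
    simp only [List.isPrefixOf, Bool.and_true, beq_iff_eq,
      List.head?_cons, Option.some.injEq]
    exact eq_comm

theorem pvHead0 (l : List Char) : l[0]? = l.head? := by
  cases l <;> simp

theorem pvRfindGo_neg_one (s : List Char) (c : Char) :
    ∀ j : Nat, (PySem.Chars.rfind.go s [c] j = -1 ↔ ∀ k : Nat, k ≤ j → s[k]? ≠ some c) := by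
  intro j
  induction j with
  | zero =>
    rw [PySem.Chars.rfind.go]
    by_cases hp : [c].isPrefixOf s = true
    · rw [if_pos hp]
      have h0 : s[0]? = some c := by rw [pvHead0]; exact (pvPrefC c s).mp hp
      constructor
      · intro h; exact absurd h (by omega)
      · intro h; exact absurd h0 (h 0 le_rfl)
    · rw [if_neg hp]
      constructor
      · intro _ k hk
        interval_cases k
        intro hs
        exact hp ((pvPrefC c s).mpr (by rw [← pvHead0]; exact hs))
      · intro _; rfl
  | succ j ih =>
    rw [PySem.Chars.rfind.go]
    by_cases hp : [c].isPrefixOf (List.drop (j + 1) s) = true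
    · rw [if_pos hp]
      have hj1 : s[j + 1]? = some c := by
        rw [← List.head?_drop]; exact (pvPrefC c _).mp hp
      constructor
      · intro h; exact absurd h (by omega)
      · intro h; exact absurd hj1 (h (j + 1) le_rfl)
    · rw [if_neg hp, ih]
      constructor
      · intro h k hk
        rcases Nat.lt_or_ge k (j + 1) with hlt | hge
        · exact h k (by omega)
        · have hkj : k = j + 1 := by omega
          subst hkj
          intro hs
          exact hp ((pvPrefC c _).mpr (by rw [List.head?_drop]; exact hs))
      · intro h k hk; exact h k (by omega)

theorem pvRfindGo_mem (s : List Char) (c : Char) :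
    ∀ j : Nat, PySem.Chars.rfind.go s [c] j ≠ -1 →
      ∃ k : Nat, PySem.Chars.rfind.go s [c] j = (k : Int) ∧ s[k]? = some c := by
  intro j
  induction j with
  | zero =>
    intro h
    rw [PySem.Chars.rfind.go] at h ⊢
    by_cases hp : [c].isPrefixOf s = true
    · rw [if_pos hp]
      exact ⟨0, by simp, by rw [pvHead0]; exact (pvPrefC c s).mp hp⟩
    · rw [if_neg hp] at h
      exact absurd rfl h
  | succ j ih =>
    intro h
    rw [PySem.Chars.rfind.go] at h ⊢
    by_cases hp : [c].isPrefixOf (List.drop (j + 1) s) = true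
    · rw [if_pos hp]
      exact ⟨j + 1, rfl, by rw [← List.head?_drop]; exact (pvPrefC c _).mp hp⟩
    · rw [if_neg hp] at h ⊢
      exact ih h

-- string-level glue
theorem pvSuffixSingle (c : Char) (l : List Char) : ([c] <:+ l) ↔ l.getLast? = some c := by
  constructor
  · rintro ⟨t, rfl⟩; simp
  · intro h
    obtain ⟨l', rfl⟩ := List.getLast?_eq_some_iff.mp h
    exact ⟨l', rfl⟩

theorem pvGet0 (q : String) (a : Char) (t : List Char) (hq : q.toList = a :: t) :
    PySem.Str.pyGet? q 0 = some a := by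
  simp [PySem.Str.pyGet?, PySem.List.pyGet?, PySem.List.pyIdx?, hq]

theorem pvGetNeg1 (q : String) (g : Char) (t : List Char) (hg : q.toList = t ++ [g]) :
    PySem.Str.pyGet? q (-1) = some g := by
  simp [PySem.Str.pyGet?, PySem.List.pyGet?, PySem.List.pyIdx?, hg]

theorem pvLenToList (q : String) : PySem.Str.len q = (q.toList.length : Int) := by
  simp [PySem.Str.len_eq]

theorem pvSlice0 (p : String) :
    (PySem.Str.slice p (some 0) (some (-1))).toList = p.toList.dropLast := by
  by_cases hp : p = ""
  · subst hp; rfl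
  · simp [PySem.Str.slice, PySem.List.slice, PySem.List.clampIdx, List.dropLast_eq_take, hp]
    omega

theorem pvSliceMid (p : String) (k : Nat) (hk : k ≤ p.toList.length) :
    (PySem.Str.slice p (some (k : Int)) (some (-1))).toList
      = (p.toList.drop k).take (p.toList.length - 1 - k) := by
  by_cases hp : p = ""
  · subst hp
    have hk0 : k = 0 := by simpa using hk
    subst hk0; rfl
  · have hk' : k ≤ p.length := by simpa using hk
    simp [PySem.Str.slice, PySem.List.slice, PySem.List.clampIdx, hp]
    rw [if_neg (show ¬((k : Int) < 0) from by omega), Nat.min_eq_left hk',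
      show ((p.length : Int) + -1).toNat = p.length - 1 from by omega]

theorem pvEndsIff (p : String) (g : Char) (hg : p.toList.getLast? = some g) :
    PySem.Str.endswith p "]" = true ↔ g = ']' := by
  rw [PySem.Str.endswith_eq, show ("]" : String).toList = [']'] from by simp,
    PySem.Chars.endswith_iff, pvSuffixSingle, hg]
  simp

theorem pvComma2 : (",," : String).toList = [',', ','] := by simp

theorem pvRfindStr (p : String) :
    PySem.Str.rfind p "[" = PySem.Chars.rfind.go p.toList ['['] p.toList.length := by
  rw [PySem.Str.rfind_eq, show ("[" : String).toList = ['['] from by simp, PySem.Chars.rfind]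

-- the main equivalence, outside D_
theorem pvMain (p : String) (hpre : p ≠ "") (hnd : ¬ D_get_var_name_py p) :
    get_var_name_py p = get_var_name_py_alt p := by
  have hcs : p.toList ≠ [] := by simp [hpre]
  have hlen1 : 1 ≤ p.toList.length := List.length_pos_of_ne_nil hcs
  obtain ⟨cl, hcl⟩ : ∃ a, p.toList.getLast? = some a := by
    cases h : p.toList.getLast? with
    | none => exact absurd (List.getLast?_eq_none_iff.mp h) hcs
    | some a => exact ⟨a, rfl⟩
  obtain ⟨t0, ht0⟩ := List.getLast?_eq_some_iff.mp hcl
  unfold get_var_name_py get_var_name_py_alt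
  rw [pvGetNeg1 p cl t0 ht0]
  dsimp only
  by_cases hcl' : cl = ']'
  · subst hcl'
    rw [if_neg (show ¬(']' ≠ ']') from by simp)]
    have hend : PySem.Str.endswith p "]" = true := (pvEndsIff p ']' hcl).mpr rfl
    have hendL : PySem.Chars.endswith p.toList [']'] = true :=
      (PySem.Chars.endswith_iff p.toList [']']).mpr ((pvSuffixSingle ']' p.toList).mpr hcl)
    rw [if_neg (show ¬¬(PySem.Str.endswith p "]" = true) from by simp [hendL]), pvRfindStr]
    by_cases hineg : PySem.Chars.rfind.go p.toList ['['] p.toList.length = -1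
    · have hnomem : '[' ∉ p.toList := by
        intro hm
        obtain ⟨n, hn, he⟩ := List.getElem_of_mem hm
        exact (pvRfindGo_neg_one p.toList '[' p.toList.length).mp hineg n (by omega)
          (by rw [List.getElem?_eq_getElem hn, he])
      rw [hineg]
      rw [if_neg (show ¬((-1 : Int) = 0 ∨ (-1 : Int) = PySem.Str.len p - 1) from by
        rw [pvLenToList]
        rintro (h | h)
        · exact absurd h (by norm_num)
        · omega)]
      rw [if_pos (show (-1 : Int) ≤ 0 from by norm_num)]
      rw [show (-1 : Int) + 1 = 0 from by norm_num]
      have hq : (PySem.Str.slice p (some 0) (some (-1))).toList = p.toList.dropLast := pvSlice0 p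
      have hdigF : ¬ pvDigits p.toList.dropLast = true := by
        intro hD
        have hendL : PySem.Chars.endswith p.toList [']'] = true :=
          (PySem.Chars.endswith_iff p.toList [']']).mpr ((pvSuffixSingle ']' p.toList).mpr hcl)
        exact hnd ⟨hendL, hnomem, hD⟩
      cases hdl : p.toList.dropLast with
      | nil =>
        rw [if_pos (show PySem.Str.len (PySem.Str.slice p (some 0) (some (-1))) = 0 from by
          rw [PySem.Str.len_eq, hq, hdl]; simp)]
      | cons a t =>
        rw [if_neg (show ¬ PySem.Str.len (PySem.Str.slice p (some 0) (some (-1))) = 0 from by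
          rw [PySem.Str.len_eq, hq, hdl]; simp only [List.length_cons]; push_cast; omega)]
        rw [pvGet0 _ a t (by rw [hq]; exact hdl)]
        have hv : ¬ pvDigits (a :: t) = true := by rw [← hdl]; exact hdigF
        obtain ⟨g, hg⟩ : ∃ g, (a :: t).getLast? = some g := by
          cases hh : (a :: t).getLast? with
          | none => exact absurd (List.getLast?_eq_none_iff.mp hh) (List.cons_ne_nil a t)
          | some g => exact ⟨g, rfl⟩
        obtain ⟨t1, ht1⟩ := List.getLast?_eq_some_iff.mp hg
        rw [pvGetNeg1 _ g t1 (by rw [hq, hdl]; exact ht1)]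
        dsimp only
        have hInf : PySem.Str.isIn ",," (PySem.Str.slice p (some 0) (some (-1))) = true
            ↔ [',', ','] <:+: (a :: t) := by
          rw [PySem.Str.isIn_iff_infix, pvComma2, hq, hdl]
        by_cases h1 : PySem.Chars.isdigit a = true
        · rw [if_neg (show ¬¬(PySem.Chars.isdigit a = true) from not_not_intro h1)]
          by_cases h2 : PySem.Chars.isdigit g = true
          · rw [if_neg (show ¬¬(PySem.Chars.isdigit g = true) from not_not_intro h2)]
            by_cases h3 : (a :: t).all (fun ch => PySem.Chars.isdigit ch || ch == ',') = true
            · rw [if_neg (show ¬¬((PySem.Str.slice p (some 0) (some (-1))).toList.all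
                  (fun ch => PySem.Chars.isdigit ch || ch == ',') = true) from by
                rw [hq, hdl]; exact not_not_intro h3)]
              by_cases h4 : PySem.Str.isIn ",," (PySem.Str.slice p (some 0) (some (-1))) = true
              · rw [if_pos h4]
              · exfalso
                apply hv
                apply (pvValA _).mpr
                refine ⟨by simp, ?_, ?_, List.all_eq_true.mp h3, fun hinf => h4 (hInf.mpr hinf)⟩
                · intro x hx
                  simp only [List.getElem?_cons_zero, Option.some.injEq] at hx
                  subst hx; exact h1
                · intro x hx
                  rw [hg] at hx
                  injection hx with hx
                  subst hx; exact h2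
            · rw [if_pos (show ¬((PySem.Str.slice p (some 0) (some (-1))).toList.all
                  (fun ch => PySem.Chars.isdigit ch || ch == ',') = true) from by
                rw [hq, hdl]; exact h3)]
          · rw [if_pos (show ¬(PySem.Chars.isdigit g = true) from h2)]
        · rw [if_pos (show ¬(PySem.Chars.isdigit a = true) from h1)]
    · obtain ⟨k, hk, hkc⟩ := pvRfindGo_mem p.toList '[' p.toList.length hineg
      obtain ⟨hklt, hke⟩ := List.getElem?_eq_some_iff.mp hkc
      rw [hk]
      by_cases hk0 : k = 0
      · subst hk0
        rw [if_pos (show ((0 : Nat) : Int) = 0 ∨ ((0 : Nat) : Int) = PySem.Str.len p - 1 from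
          Or.inl (by norm_num))]
        rw [if_pos (show ((0 : Nat) : Int) ≤ 0 from by norm_num)]
      · by_cases hklast : k = p.toList.length - 1
        · rw [if_pos (show ((k : Nat) : Int) = 0 ∨ ((k : Nat) : Int) = PySem.Str.len p - 1 from
            Or.inr (by rw [pvLenToList, hklast, Nat.cast_sub hlen1]; norm_num))]
          rw [if_neg (show ¬((k : Int) ≤ 0) from fun hcon => hk0 (by omega))]
          have hq2 : (PySem.Str.slice p (some ((k : Int) + 1)) (some (-1))).toList = [] := by
            rw [show (k : Int) + 1 = ((k + 1 : Nat) : Int) from by push_cast; ring]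
            rw [pvSliceMid p (k + 1) (by omega)]
            rw [show k + 1 = p.toList.length from by omega, List.drop_length]
            simp
          rw [if_neg (show ¬((PySem.Chars.splitOn (PySem.Str.slice p (some ((k : Int) + 1))
              (some (-1))).toList [',']).all PySem.Chars.strIsdigit = true) from by
            rw [hq2, pvSplitOn_eq]; simp [pvSplit, PySem.Chars.strIsdigit])]
        · rw [if_neg (show ¬(((k : Nat) : Int) = 0 ∨ ((k : Nat) : Int) = PySem.Str.len p - 1) from by
            rw [pvLenToList]
            rintro (h | h)
            · exact hk0 (by exact_mod_cast h)
            · exact hklast (by omega))]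
          rw [if_neg (show ¬((k : Int) ≤ 0) from fun hcon => hk0 (by omega))]
          rw [pvValB]
          cases hqt : (PySem.Str.slice p (some ((k : Int) + 1)) (some (-1))).toList with
          | nil =>
            rw [if_pos (show PySem.Str.len (PySem.Str.slice p (some ((k : Int) + 1)) (some (-1))) = 0
              from by rw [PySem.Str.len_eq, hqt]; simp)]
            rw [if_neg (show ¬(pvDigits ([] : List Char) = true) from by simp [pvDigits])]
          | cons a t =>
            rw [if_neg (show ¬ PySem.Str.len (PySem.Str.slice p (some ((k : Int) + 1)) (some (-1))) = 0
              from by rw [PySem.Str.len_eq, hqt]; simp only [List.length_cons]; push_cast; omega)]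
            rw [pvGet0 _ a t hqt]
            obtain ⟨g, hg⟩ : ∃ g, (a :: t).getLast? = some g := by
              cases hh : (a :: t).getLast? with
              | none => exact absurd (List.getLast?_eq_none_iff.mp hh) (List.cons_ne_nil a t)
              | some g => exact ⟨g, rfl⟩
            obtain ⟨t1, ht1⟩ := List.getLast?_eq_some_iff.mp hg
            rw [pvGetNeg1 _ g t1 (by rw [hqt]; exact ht1)]
            dsimp only
            have hInf : PySem.Str.isIn ",," (PySem.Str.slice p (some ((k : Int) + 1)) (some (-1))) = true
                ↔ [',', ','] <:+: (a :: t) := by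
              rw [PySem.Str.isIn_iff_infix, pvComma2, hqt]
            by_cases hv : pvDigits (a :: t) = true
            · obtain ⟨_, hhead, hlast, hmem, hinf⟩ := (pvValA _).mp hv
              rw [if_neg (show ¬¬(PySem.Chars.isdigit a = true) from
                not_not_intro (hhead a (by simp)))]
              rw [if_neg (show ¬¬(PySem.Chars.isdigit g = true) from
                not_not_intro (hlast g hg))]
              rw [if_neg (show ¬¬((a :: t).all
                  (fun ch => PySem.Chars.isdigit ch || ch == ',') = true) from
                not_not_intro (List.all_eq_true.mpr hmem))]
              rw [if_neg (show ¬(PySem.Str.isIn ",," (PySem.Str.slice p (some ((k : Int) + 1))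
                  (some (-1))) = true) from fun hIn => hinf (hInf.mp hIn))]
              rw [if_pos hv]
            · rw [if_neg hv]
              by_cases h1 : PySem.Chars.isdigit a = true
              · rw [if_neg (show ¬¬(PySem.Chars.isdigit a = true) from not_not_intro h1)]
                by_cases h2 : PySem.Chars.isdigit g = true
                · rw [if_neg (show ¬¬(PySem.Chars.isdigit g = true) from not_not_intro h2)]
                  by_cases h3 : (a :: t).all (fun ch => PySem.Chars.isdigit ch || ch == ',') = true
                  · rw [if_neg (show ¬¬((a :: t).all
                        (fun ch => PySem.Chars.isdigit ch || ch == ',') = true) from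
                      not_not_intro h3)]
                    by_cases h4 : PySem.Str.isIn ",," (PySem.Str.slice p (some ((k : Int) + 1))
                        (some (-1))) = true
                    · rw [if_pos h4]
                    · exfalso
                      apply hv
                      apply (pvValA _).mpr
                      refine ⟨by simp, ?_, ?_, List.all_eq_true.mp h3, fun hinf => h4 (hInf.mpr hinf)⟩
                      · intro x hx
                        simp only [List.getElem?_cons_zero, Option.some.injEq] at hx
                        subst hx; exact h1
                      · intro x hx
                        rw [hg] at hx
                        injection hx with hx
                        subst hx; exact h2
                  · rw [if_pos (show ¬((a :: t).all
                        (fun ch => PySem.Chars.isdigit ch || ch == ',') = true) from h3)]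
                · rw [if_pos (show ¬(PySem.Chars.isdigit g = true) from h2)]
              · rw [if_pos (show ¬(PySem.Chars.isdigit a = true) from h1)]
  · rw [if_pos (show cl ≠ ']' from hcl')]
    rw [if_pos (show ¬(PySem.Str.endswith p "]" = true) from by
      rw [pvEndsIff p cl hcl]; exact hcl')]

-- ===== VERDICT (by name: the statement is the Claim_ definition above) =====
theorem get_var_name_py_spec : Claim_unchanged_get_var_name_py := by
  intro p _ hpre hnd
  exact pvMain p hpre hnd

theorem get_var_name_py_changed : Claim_changed_get_var_name_py := by
  unfold Claim_changed_get_var_name_py; decide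

theorem get_var_name_py_tight : Claim_exact_get_var_name_py := by
  intro p _ hpre hD
  obtain ⟨hend, hnomem, hdig⟩ := hD
  have hpre' : p ≠ "" := hpre
  have hcs : p.toList ≠ [] := by simp [hpre']
  have hlen1 : 1 ≤ p.toList.length := List.length_pos_of_ne_nil hcs
  have hcl : p.toList.getLast? = some ']' :=
    (pvSuffixSingle _ _).mp ((PySem.Chars.endswith_iff _ _).mp hend)
  obtain ⟨t0, ht0⟩ := List.getLast?_eq_some_iff.mp hcl
  have hgo : PySem.Chars.rfind.go p.toList ['['] p.toList.length = -1 := by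
    apply (pvRfindGo_neg_one _ _ _).mpr
    intro k hk hs
    exact hnomem (List.mem_of_getElem? hs)
  have hA : get_var_name_py p = PySem.Str.slice p none (some (-1)) := by
    unfold get_var_name_py
    rw [pvGetNeg1 p ']' t0 ht0]
    dsimp only
    rw [if_neg (show ¬(']' ≠ ']') from by simp)]
    rw [pvRfindStr, hgo]
    rw [if_neg (show ¬((-1 : Int) = 0 ∨ (-1 : Int) = PySem.Str.len p - 1) from by
      rw [pvLenToList]
      rintro (h | h)
      · exact absurd h (by norm_num)
      · omega)]
    rw [show (-1 : Int) + 1 = 0 from by norm_num]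
    have hq : (PySem.Str.slice p (some 0) (some (-1))).toList = p.toList.dropLast := pvSlice0 p
    cases hdl : p.toList.dropLast with
    | nil => rw [hdl] at hdig; exact absurd hdig (by simp [pvDigits])
    | cons a t =>
      rw [hdl] at hdig
      obtain ⟨_, hhead, hlast, hmem, hinf⟩ := (pvValA _).mp hdig
      have hq2 : (PySem.Str.slice p (some 0) (some (-1))).toList = a :: t := by
        rw [hq]; exact hdl
      rw [if_neg (show ¬ PySem.Str.len (PySem.Str.slice p (some 0) (some (-1))) = 0 from by
        rw [PySem.Str.len_eq, hq2]; simp only [List.length_cons]; push_cast; omega)]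
      rw [pvGet0 _ a t hq2]
      obtain ⟨g, hg⟩ : ∃ g, (a :: t).getLast? = some g := by
        cases hh : (a :: t).getLast? with
        | none => exact absurd (List.getLast?_eq_none_iff.mp hh) (List.cons_ne_nil a t)
        | some g => exact ⟨g, rfl⟩
      obtain ⟨t1, ht1⟩ := List.getLast?_eq_some_iff.mp hg
      rw [pvGetNeg1 _ g t1 (by rw [hq2]; exact ht1)]
      dsimp only
      rw [if_neg (show ¬¬(PySem.Chars.isdigit a = true) from
        not_not_intro (hhead a (by simp)))]
      rw [if_neg (show ¬¬(PySem.Chars.isdigit g = true) from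
        not_not_intro (hlast g hg))]
      rw [if_neg (show ¬¬((PySem.Str.slice p (some 0) (some (-1))).toList.all
          (fun ch => PySem.Chars.isdigit ch || ch == ',') = true) from by
        rw [hq2]; exact not_not_intro (List.all_eq_true.mpr hmem))]
      rw [if_neg (show ¬(PySem.Str.isIn ",," (PySem.Str.slice p (some 0) (some (-1))) = true) from by
        intro hIn
        rw [PySem.Str.isIn_iff_infix, pvComma2, hq2] at hIn
        exact hinf hIn)]
  have hB : get_var_name_py_alt p = p := by
    unfold get_var_name_py_alt
    have hend' : PySem.Str.endswith p "]" = true := by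
      rw [PySem.Str.endswith_eq, show ("]" : String).toList = [']'] from by simp]
      exact hend
    rw [if_neg (show ¬¬(PySem.Str.endswith p "]" = true) from by simp [hend])]
    rw [pvRfindStr, hgo]
    rw [if_pos (show (-1 : Int) ≤ 0 from by norm_num)]
  rw [hA, hB]
  intro heq
  have h1 := congrArg String.toList heq
  rw [PySem.Str.slice_to_neg_one] at h1
  have h2 := congrArg List.length h1
  simp only [List.length_dropLast] at h2
  omega
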